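-- pv_equiv track=rewrite | github.com/haslamdb/biogpu | tests/debug_kmer_binary.py | extract_kmers_encoded
-- ===== SOURCE A (Python) =====
-- KMER_LENGTH = 15
--
-- BASE_A = 0
--
-- BASE_C = 1
--
-- BASE_G = 2
--
-- BASE_T = 3
--
-- BASE_N = 4
--
-- def encode_base(base):
--     """Encode base to 2-bit representation"""
--     base = base.upper()
--     if base == 'A': return BASE_A
--     elif base == 'C': return BASE_C
--     elif base == 'G': return BASE_G
--     elif base == 'T': return BASE_T
--     else: return BASE_N
--
-- def encode_kmer(seq):
--     """Encode k-mer string to 64-bit integer"""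
--     if len(seq) != KMER_LENGTH:
--         return None
--
--     kmer = 0
--     for base in seq:
--         encoded = encode_base(base)
--         if encoded == BASE_N:
--             return None  # Invalid k-mer
--         kmer = (kmer << 2) | encoded
--     return kmer
--
-- def extract_kmers_encoded(sequence):
--     """Extract all k-mers from sequence as encoded integers"""
--     kmers = set()
--     for i in range(len(sequence) - KMER_LENGTH + 1):
--         kmer_str = sequence[i:i+KMER_LENGTH]
--         encoded = encode_kmer(kmer_str)
--         if encoded is not None:
--             kmers.add(encoded)
--     return kmers
-- ===== SOURCE B (Python) =====
-- KMER_LENGTH = 15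
-- MOD = 4 ** 15
-- _CODES = {'A': 0, 'C': 1, 'G': 2, 'T': 3}
--
-- def extract_kmers_encoded(sequence):
--     """Extract all k-mers from sequence as encoded integers (rolling window)."""
--     kmers = set()
--     kmer = 0
--     run = 0
--     for ch in sequence:
--         code = _CODES.get(ch.upper())
--         if code is None:
--             run = 0
--         else:
--             kmer = (kmer * 4 + code) % MOD
--             run += 1
--             if run >= KMER_LENGTH:
--                 kmers.add(kmer)
--     return kmers
-- ===== Notes on version B (the rewrite author's own statement) =====
-- stated objective: faster
-- what changed: Replaces the per-position slice-and-re-encode of every 15-mer with a single left-to-right pass that keeps a rolling code (multiply-add mod 4^15) and a run length of consecutive valid bases to know when a full valid window ends.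
import Mathlib
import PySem

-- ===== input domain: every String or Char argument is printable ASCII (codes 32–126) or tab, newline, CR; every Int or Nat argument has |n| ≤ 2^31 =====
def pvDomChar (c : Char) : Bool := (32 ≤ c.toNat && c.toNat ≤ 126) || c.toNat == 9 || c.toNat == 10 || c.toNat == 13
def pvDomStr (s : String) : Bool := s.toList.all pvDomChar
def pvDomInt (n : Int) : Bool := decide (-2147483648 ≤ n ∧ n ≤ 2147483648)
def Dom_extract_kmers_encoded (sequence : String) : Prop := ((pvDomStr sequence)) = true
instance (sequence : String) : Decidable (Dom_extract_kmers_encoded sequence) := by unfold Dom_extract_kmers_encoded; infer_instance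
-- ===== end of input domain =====

-- B replaces A's slice-and-re-encode of every 15-mer by one left-to-right pass with a
-- rolling code modulo 4^15 and a run length of consecutive valid bases (objective: faster).

-- ===== PORT A =====
def encode_base (base : Char) : Int :=
  let b := PySem.Chars.upperChar base
  if b = 'A' then 0
  else if b = 'C' then 1
  else if b = 'G' then 2
  else if b = 'T' then 3
  else 4

-- the 'for base in seq' loop of encode_kmer, with Python's early 'return None'
def encode_kmer_loop : List Char → Int → Option Int
  | [], kmer => some kmer
  | base :: rest, kmer =>
    let encoded := encode_base base
    if encoded = 4 then none
    -- '(kmer << 2) | encoded' ported by hand as Int.shiftLeft / Int.lor (exact: both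
    -- arguments are the same mathematical integers Python shifts and ors)
    else encode_kmer_loop rest (Int.lor (kmer <<< 2) encoded)

def encode_kmer (seq : String) : Option Int :=
  if PySem.Str.len seq ≠ 15 then none
  else encode_kmer_loop seq.toList 0

def extract_kmers_encoded (sequence : String) : List Int :=
  (PySem.List.pyRange 0 (PySem.Str.len sequence - 15 + 1) 1).foldl
    (fun kmers i =>
      let kmer_str := PySem.Str.slice sequence (some i) (some (i + 15))
      match encode_kmer kmer_str with
      | some encoded => PySem.Set.add kmers encoded
      | none => kmers) []

-- ===== PORT B =====
-- _CODES = {'A': 0, 'C': 1, 'G': 2, 'T': 3}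
def pvCodes : PySem.Dict Char Int :=
  PySem.Dict.ofList [('A', 0), ('C', 1), ('G', 2), ('T', 3)]

-- MOD = 4 ** 15 = 1073741824
def extract_kmers_encoded_alt (sequence : String) : List Int :=
  (sequence.toList.foldl
    (fun (st : Int × Int × List Int) ch =>
      match PySem.Dict.get? pvCodes (PySem.Chars.upperChar ch) with
      | none => (st.1, 0, st.2.2)
      | some code =>
        let kmer := PySem.Int.mod (st.1 * 4 + code) 1073741824
        let run := st.2.1 + 1
        if 15 ≤ run then (kmer, run, PySem.Set.add st.2.2 kmer)
        else (kmer, run, st.2.2))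
    (0, 0, [])).2.2

-- ===== PRECONDITION & SPEC =====
def Spec_extract_kmers_encoded (sequence : String) (out : List Int) : Prop := out = extract_kmers_encoded_alt sequence
instance (sequence : String) (out : List Int) : Decidable (Spec_extract_kmers_encoded sequence out) := by unfold Spec_extract_kmers_encoded; infer_instance

-- ===== CLAIM (what is proved, stated in full; the proofs are below) =====
def Claim_equal_extract_kmers_encoded : Prop := ∀ (sequence : String), Dom_extract_kmers_encoded sequence → Spec_extract_kmers_encoded sequence (extract_kmers_encoded sequence)

-- ===== LEMMAS AND PROOFS =====

-- ---- proof-side helper functions (A and B re-stated over List Char) ----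

/-- A's set of encoded windows, over a char list. -/
def asetL (cs : List Char) : List Int :=
  (PySem.List.pyRange 0 ((cs.length : Int) - 15 + 1) 1).foldl
    (fun kmers i =>
      match (if ((PySem.Chars.slice cs (some i) (some (i + 15))).length : Int) ≠ 15 then none
             else encode_kmer_loop (PySem.Chars.slice cs (some i) (some (i + 15))) 0) with
      | some encoded => PySem.Set.add kmers encoded
      | none => kmers) []

/-- B's loop body. -/
def stepB (st : Int × Int × List Int) (ch : Char) : Int × Int × List Int :=
  match PySem.Dict.get? pvCodes (PySem.Chars.upperChar ch) with
  | none => (st.1, 0, st.2.2)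
  | some code =>
    let kmer := PySem.Int.mod (st.1 * 4 + code) 1073741824
    let run := st.2.1 + 1
    if 15 ≤ run then (kmer, run, PySem.Set.add st.2.2 kmer)
    else (kmer, run, st.2.2)

/-- plain (unmodded) horner encoding, A's '(kmer << 2) | encoded' made arithmetic. -/
def encA (w : List Char) (k : Int) : Int :=
  w.foldl (fun k c => k * 4 + encode_base c) k

/-- B's rolling code as a pure fold. -/
def kOf (cs : List Char) : Int :=
  cs.foldl (fun k c => if encode_base c = 4 then k else (k * 4 + encode_base c) % 1073741824) 0

/-- B's run counter as a pure value. -/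
def rOf (cs : List Char) : Int :=
  ((cs.reverse.takeWhile (fun c => !(encode_base c == 4))).length : Int)

-- ---- small facts ----

lemma or4 (m e : Nat) (he : e < 4) : 4*m ||| e = 4*m + e := by
  have hd : (4*m ||| e) / 4 = m := by
    have h1 : (4*m ||| e) / 2 / 2 = (4*m/2/2) ||| (e/2/2) := by rw [Nat.or_div_two, Nat.or_div_two]
    have h2 : e/2/2 = 0 := by omega
    have h3 : 4*m/2/2 = m := by omega
    simp [h2, h3] at h1
    omega
  have hm : (4*m ||| e) % 4 = e := by
    have h4 : (4*m ||| e) &&& (2^2 - 1) = (4*m ||| e) % 2^2 := Nat.and_two_pow_sub_one_eq_mod _ 2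
    have h5 : (4*m ||| e) &&& 3 = (4*m &&& 3) ||| (e &&& 3) := by
      rw [Nat.and_comm, Nat.and_or_distrib_left, Nat.and_comm 3 (4*m), Nat.and_comm 3 e]
    have h6 : 4*m &&& (2^2-1) = 4*m % 2^2 := Nat.and_two_pow_sub_one_eq_mod _ 2
    have h7 : e &&& (2^2-1) = e % 2^2 := Nat.and_two_pow_sub_one_eq_mod _ 2
    norm_num at h4 h6 h7
    rw [h5, h6, h7] at h4
    simp at h4
    omega
  omega

lemma intOr4 (k e : Int) (hk : 0 ≤ k) (he : 0 ≤ e) (he4 : e < 4) :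
    Int.lor (k <<< 2) e = k*4 + e := by
  lift k to Nat using hk
  lift e to Nat using he
  have hn : e < 4 := by exact_mod_cast he4
  have hnat : (k <<< 2) ||| e = 4*k + e := by
    have h22 : k * 2^2 = 4*k := by ring
    rw [Nat.shiftLeft_eq, h22]
    exact or4 k e hn
  rw [show ((k:Int) <<< 2) = ((k <<< 2 : Nat) : Int) from rfl,
      show Int.lor ((k <<< 2:Nat):Int) ((e:Nat):Int) = ((k <<< 2 ||| e : Nat):Int) from rfl, hnat]
  push_cast
  ring

lemma encode_base_cases (c : Char) :
    encode_base c = 0 ∨ encode_base c = 1 ∨ encode_base c = 2 ∨ encode_base c = 3 ∨ encode_base c = 4 := by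
  unfold encode_base
  simp only []
  split_ifs <;> simp

lemma encode_base_range (c : Char) (h : encode_base c ≠ 4) :
    0 ≤ encode_base c ∧ encode_base c < 4 := by
  rcases encode_base_cases c with h0|h0|h0|h0|h0
  · rw [h0]; omega
  · rw [h0]; omega
  · rw [h0]; omega
  · rw [h0]; omega
  · exact absurd h0 h

lemma items_codes : (pvCodes).items = [('A', 0), ('C', 1), ('G', 2), ('T', 3)] := by decide

/-- bridge: B's dict lookup is A's base encoder with 4 read as "invalid". -/
lemma get_codes_eq (ch : Char) :
    PySem.Dict.get? pvCodes (PySem.Chars.upperChar ch) =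
      (if encode_base ch = 4 then none else some (encode_base ch)) := by
  unfold encode_base PySem.Dict.get?
  rw [items_codes]
  simp only []
  generalize PySem.Chars.upperChar ch = u
  by_cases h1 : u = 'A' <;> by_cases h2 : u = 'C' <;> by_cases h3 : u = 'G' <;> by_cases h4 : u = 'T' <;>
    simp_all [List.find?, eq_comm] <;>
    · have e1 : ('A' == u) = false := beq_eq_false_iff_ne.mpr (Ne.symm h1)
      have e2 : ('C' == u) = false := beq_eq_false_iff_ne.mpr (Ne.symm h2)
      have e3 : ('G' == u) = false := beq_eq_false_iff_ne.mpr (Ne.symm h3)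
      have e4 : ('T' == u) = false := beq_eq_false_iff_ne.mpr (Ne.symm h4)
      simp [e1, e2, e3, e4]

/-- A's inner loop: all-valid windows give the horner value, an invalid base gives none. -/
lemma encode_kmer_loop_eq (w : List Char) (k : Int) (hk : 0 ≤ k) :
    encode_kmer_loop w k =
      (if w.all (fun c => !(encode_base c == 4)) then some (encA w k) else none) := by
  induction w generalizing k with
  | nil => simp [encode_kmer_loop, encA]
  | cons c w ih =>
    by_cases hc : encode_base c = 4
    · simp [encode_kmer_loop, hc]
    · obtain ⟨he0, he4⟩ := encode_base_range c hc
      have hlor : Int.lor (k <<< 2) (encode_base c) = k * 4 + encode_base c := intOr4 k _ hk he0 he4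
      have hstep : encode_kmer_loop (c :: w) k = encode_kmer_loop w (k * 4 + encode_base c) := by
        simp [encode_kmer_loop, hc, hlor]
      rw [hstep, ih _ (by positivity)]
      have hall : (c :: w).all (fun c => !(encode_base c == 4)) = w.all (fun c => !(encode_base c == 4)) := by
        simp [hc]
      rw [hall]
      rfl

lemma encA_shift (w : List Char) (k : Int) :
    encA w k = k * 4 ^ w.length + encA w 0 := by
  induction w generalizing k with
  | nil => simp [encA]
  | cons c w ih =>
    show encA w (k*4 + encode_base c) = _
    rw [ih (k*4 + encode_base c)]
    have h0 : encA (c :: w) 0 = encA w (0*4 + encode_base c) := rfl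
    rw [h0, ih (0*4 + encode_base c)]
    simp [List.length_cons, pow_succ]
    ring

lemma encA_bound (w : List Char) (h : w.all (fun c => !(encode_base c == 4))) :
    0 ≤ encA w 0 ∧ encA w 0 < 4 ^ w.length := by
  induction w with
  | nil => simp [encA]
  | cons c w ih =>
    simp only [List.all_cons, Bool.and_eq_true, Bool.not_eq_true', beq_eq_false_iff_ne] at h
    obtain ⟨hc, hw⟩ := h
    obtain ⟨he0, he4⟩ := encode_base_range c hc
    obtain ⟨hz0, hz4⟩ := ih (by simpa using hw)
    have h1 : encA (c :: w) 0 = encA w (0*4 + encode_base c) := rfl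
    rw [h1, encA_shift]
    constructor
    · positivity
    · have h3 : encode_base c * 4 ^ w.length ≤ 3 * 4 ^ w.length := by
        have := pow_pos (show (0:Int) < 4 by norm_num) w.length
        nlinarith
      simp [List.length_cons, pow_succ]
      nlinarith [pow_pos (show (0:Int) < 4 by norm_num) w.length]

/-- B's rolling code over an all-valid block is the horner value mod 4^15. -/
lemma kfold_valid (w : List Char) (k : Int) (h : w.all (fun c => !(encode_base c == 4))) :
    w.foldl (fun k c => if encode_base c = 4 then k else (k * 4 + encode_base c) % 1073741824) k
      = (if w = [] then k else encA w k % 1073741824) := by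
  induction w generalizing k with
  | nil => simp
  | cons c w ih =>
    simp only [List.all_cons, Bool.and_eq_true, Bool.not_eq_true', beq_eq_false_iff_ne] at h
    obtain ⟨hc, hw⟩ := h
    have hstep : (c :: w).foldl (fun k c => if encode_base c = 4 then k else (k * 4 + encode_base c) % 1073741824) k
        = w.foldl (fun k c => if encode_base c = 4 then k else (k * 4 + encode_base c) % 1073741824) ((k * 4 + encode_base c) % 1073741824) := by
      simp [List.foldl_cons, hc]
    rw [hstep, ih _ (by simpa using hw)]
    simp only [if_neg (by simp : ¬(c :: w) = [])]
    rcases eq_or_ne w [] with rfl | hne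
    · simp [encA]
    rw [if_neg hne]
    have hE : encA (c :: w) k = encA w (k * 4 + encode_base c) := rfl
    rw [hE]
    set x := k * 4 + encode_base c with hx
    have hmod : Int.ModEq 1073741824 (x % 1073741824) x := Int.emod_emod_of_dvd x dvd_rfl
    have hcong : Int.ModEq 1073741824 (encA w (x % 1073741824)) (encA w x) := by
      rw [encA_shift w (x % 1073741824), encA_shift w x]
      exact (hmod.mul_right _).add_right _
    exact hcong

lemma kOf_last_window (q w : List Char) (r : List Char) (hq : q = r ++ w)
    (hw : w.length = 15) (h : w.all (fun c => !(encode_base c == 4))) :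
    kOf q = encA w 0 := by
  subst hq
  unfold kOf
  rw [List.foldl_append]
  rw [kfold_valid w _ h, if_neg (by intro h0; rw [h0] at hw; simp at hw)]
  rw [encA_shift w _, hw]
  have hM : (4:Int)^15 = 1073741824 := by norm_num
  obtain ⟨hz0, hz4⟩ := encA_bound w h
  rw [hw, hM] at hz4
  have hsplit : ∀ a z : Int, (a * 4 ^ 15 + z) % 1073741824 = z % 1073741824 := by
    intro a z
    omega
  rw [hsplit, Int.emod_eq_of_lt hz0 hz4]

lemma takeWhile_len_ge {α : Type} (P : α → Bool) (l : List α) (n : Nat) (hn : n ≤ l.length) :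
    (n ≤ (l.takeWhile P).length ↔ ∀ x ∈ l.take n, P x) := by
  induction l generalizing n with
  | nil => simp at hn; simp [hn]
  | cons a l ih =>
    cases n with
    | zero => simp
    | succ n =>
      simp only [List.takeWhile_cons, List.take_succ_cons, List.length_cons] at *
      by_cases hP : P a
      · simp only [hP, if_true, List.length_cons, Nat.add_le_add_iff_right, List.mem_cons]
        rw [ih n (by omega)]
        constructor
        · rintro hh x (rfl | hx)
          · exact hP
          · exact hh x hx
        · intro hh x hx
          exact hh x (Or.inr hx)
      · simp [hP]

lemma rOf_le (cs : List Char) : rOf cs ≤ (cs.length : Int) := by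
  unfold rOf
  have h1 : (cs.reverse.takeWhile (fun c => !(encode_base c == 4))).length ≤ cs.reverse.length :=
    (List.takeWhile_sublist _).length_le
  simp at h1
  exact_mod_cast h1

lemma rOf_ge15 (q : List Char) (hq : 15 ≤ q.length) :
    (15 ≤ rOf q ↔ (q.drop (q.length - 15)).all (fun c => !(encode_base c == 4))) := by
  unfold rOf
  rw [show (15:Int) ≤ ((q.reverse.takeWhile (fun c => !(encode_base c == 4))).length : Int) ↔
      15 ≤ (q.reverse.takeWhile (fun c => !(encode_base c == 4))).length by exact_mod_cast Iff.rfl]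
  rw [takeWhile_len_ge _ _ 15 (by simpa using hq)]
  rw [List.take_reverse]
  simp [List.all_eq_true]

lemma rOf_append_valid (p : List Char) (c : Char) (h : encode_base c ≠ 4) :
    rOf (p ++ [c]) = rOf p + 1 := by
  unfold rOf
  rw [List.reverse_append]
  simp [h]

lemma rOf_append_invalid (p : List Char) (c : Char) (h : encode_base c = 4) :
    rOf (p ++ [c]) = 0 := by
  unfold rOf
  rw [List.reverse_append]
  simp [h]

/-- the A-side fold body over a char list. -/
def bodyA (cs : List Char) (kmers : List Int) (i : Int) : List Int :=
  match (if ((PySem.Chars.slice cs (some i) (some (i + 15))).length : Int) ≠ 15 then none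
         else encode_kmer_loop (PySem.Chars.slice cs (some i) (some (i + 15))) 0) with
  | some encoded => PySem.Set.add kmers encoded
  | none => kmers

lemma asetL_eq_foldl (cs : List Char) :
    asetL cs = (PySem.List.pyRange 0 ((cs.length : Int) - 15 + 1) 1).foldl (bodyA cs) [] := rfl

/-- windows entirely inside the old prefix are unchanged by appending a character. -/
lemma slice_snoc (p : List Char) (c : Char) (i : Int) (h0 : 0 ≤ i) (h15 : i + 15 ≤ (p.length : Int)) :
    PySem.Chars.slice (p ++ [c]) (some i) (some (i + 15)) = PySem.Chars.slice p (some i) (some (i + 15)) := by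
  simp only [PySem.Chars.slice]
  rw [PySem.List.slice_toNat _ h0 (by omega), PySem.List.slice_toNat _ h0 (by omega)]
  have h1 : i.toNat ≤ p.length := by omega
  rw [List.drop_append_of_le_length h1]
  have h2 : (i+15).toNat - i.toNat = 15 := by omega
  rw [h2]
  exact List.take_append_of_le_length (by rw [List.length_drop]; omega)

/-- the new window is the last 15 characters. -/
lemma slice_last (p : List Char) (c : Char) (h : 14 ≤ p.length) :
    PySem.Chars.slice (p ++ [c]) (some ((p.length : Int) - 14)) (some ((p.length : Int) - 14 + 15))
      = (p ++ [c]).drop (p.length - 14) := by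
  simp only [PySem.Chars.slice]
  rw [PySem.List.slice_toNat _ (by omega) (by omega)]
  have e1 : ((p.length : Int) - 14).toNat = p.length - 14 := by omega
  have e2 : ((p.length : Int) - 14 + 15).toNat = p.length + 1 := by omega
  rw [e1, e2]
  apply List.take_of_length_le
  rw [List.length_drop]
  simp only [List.length_append, List.length_cons, List.length_nil]
  omega

lemma asetL_snoc (p : List Char) (c : Char) :
    asetL (p ++ [c]) =
      (if 14 ≤ p.length then
        (match (if ((p ++ [c]).drop (p.length - 14)).all (fun x => !(encode_base x == 4)) then
                  some (encA ((p ++ [c]).drop (p.length - 14)) 0) else none) with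
         | some e => PySem.Set.add (asetL p) e
         | none => asetL p)
      else asetL p) := by
  rw [asetL_eq_foldl, asetL_eq_foldl]
  have hlen : (((p ++ [c]).length : Nat) : Int) = (p.length : Int) + 1 := by simp
  rw [hlen]
  by_cases h14 : 14 ≤ p.length
  · rw [if_pos h14]
    have hsplit : (p.length : Int) + 1 - 15 + 1 = ((p.length : Int) - 14) + 1 := by ring
    rw [hsplit, PySem.List.pyRange_one_succ_right (by omega : (0:Int) ≤ (p.length : Int) - 14),
        List.foldl_append]
    have hfirst : List.foldl (bodyA (p ++ [c])) [] (PySem.List.pyRange 0 ((p.length : Int) - 14)) =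
        List.foldl (bodyA p) [] (PySem.List.pyRange 0 ((p.length : Int) - 14)) := by
      apply PySem.List.foldl_congr_mem
      intro acc i hi
      rw [PySem.List.mem_pyRange_one] at hi
      unfold bodyA
      rw [slice_snoc p c i hi.1 (by omega)]
    have hrange : (p.length : Int) - 15 + 1 = (p.length : Int) - 14 := by ring
    rw [hfirst, hrange]
    show bodyA (p ++ [c]) _ ((p.length : Int) - 14) = _
    unfold bodyA
    rw [slice_last p c h14]
    have hwlen : ((p ++ [c]).drop (p.length - 14)).length = 15 := by
      rw [List.length_drop]; simp; omega
    rw [if_neg (by rw [hwlen]; norm_num)]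
    rw [encode_kmer_loop_eq _ 0 le_rfl]
  · rw [if_neg h14]
    rw [PySem.List.pyRange_one_eq_nil (by omega : (p.length : Int) + 1 - 15 + 1 ≤ 0)]
    rw [PySem.List.pyRange_one_eq_nil (by omega : (p.length : Int) - 15 + 1 ≤ 0)]
    rfl

lemma kOf_snoc_valid (p : List Char) (c : Char) (h : encode_base c ≠ 4) :
    kOf (p ++ [c]) = (kOf p * 4 + encode_base c) % 1073741824 := by
  unfold kOf
  rw [List.foldl_append]
  simp [h]

lemma kOf_snoc_invalid (p : List Char) (c : Char) (h : encode_base c = 4) :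
    kOf (p ++ [c]) = kOf p := by
  unfold kOf
  rw [List.foldl_append]
  simp [h]

/-- main invariant: B's fold state over cs. -/
lemma foldB_inv (cs : List Char) :
    cs.foldl stepB (0, 0, []) = (kOf cs, rOf cs, asetL cs) := by
  induction cs using List.reverseRecOn with
  | nil => rfl
  | append_singleton p c ih =>
    rw [List.foldl_append, ih]
    show stepB (kOf p, rOf p, asetL p) c = _
    unfold stepB
    rw [get_codes_eq c, asetL_snoc p c]
    simp only [PySem.Int.mod_eq_emod_of_pos (show (0:Int) < 1073741824 by norm_num)]
    by_cases hc : encode_base c = 4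
    · rw [if_pos hc]
      rw [kOf_snoc_invalid p c hc, rOf_append_invalid p c hc]
      by_cases h14 : 14 ≤ p.length
      · rw [if_pos h14]
        have hcmem : c ∈ (p ++ [c]).drop (p.length - 14) := by
          rw [List.drop_append_of_le_length (by omega)]
          simp
        have hallf : ((p ++ [c]).drop (p.length - 14)).all (fun x => !(encode_base x == 4)) = false := by
          apply List.all_eq_false.mpr
          exact ⟨c, hcmem, by simp [hc]⟩
        rw [hallf]
        simp
      · rw [if_neg h14]
    · rw [if_neg hc]
      simp only []
      rw [kOf_snoc_valid p c hc, rOf_append_valid p c hc]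
      set w := (p ++ [c]).drop (p.length - 14) with hwdef
      by_cases h14 : 14 ≤ p.length
      · rw [if_pos h14]
        have hlen : (p ++ [c]).length = p.length + 1 := by simp
        have hwlen : w.length = 15 := by
          rw [hwdef, List.length_drop, hlen]; omega
        have hge : (15 ≤ rOf (p ++ [c])) ↔ w.all (fun x => !(encode_base x == 4)) := by
          have := rOf_ge15 (p ++ [c]) (by omega)
          rw [hlen] at this
          rw [hwdef]
          convert this using 3
        rw [← rOf_append_valid p c hc] at *
        by_cases hrun : 15 ≤ rOf (p ++ [c])
        · rw [if_pos hrun]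
          have hall : w.all (fun x => !(encode_base x == 4)) := hge.mp hrun
          rw [if_pos hall]
          have hk : (kOf p * 4 + encode_base c) % 1073741824 = encA w 0 := by
            rw [← kOf_snoc_valid p c hc]
            exact kOf_last_window (p ++ [c]) w ((p ++ [c]).take (p.length - 14))
              (List.take_append_drop _ _).symm hwlen hall
          rw [hk]
        · rw [if_neg hrun]
          have hall : w.all (fun x => !(encode_base x == 4)) = false :=
            Bool.eq_false_iff.mpr (fun h => hrun (hge.mpr h))
          rw [hall]
          simp
      · rw [if_neg h14]
        have hrun : ¬ 15 ≤ rOf p + 1 := by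
          have := rOf_le p
          omega
        rw [if_neg hrun]

lemma encode_kmer_slice (s : String) (a b : Int) :
    encode_kmer (PySem.Str.slice s (some a) (some b)) =
      (if ((PySem.Chars.slice s.toList (some a) (some b)).length : Int) ≠ 15 then none
       else encode_kmer_loop (PySem.Chars.slice s.toList (some a) (some b)) 0) := by
  unfold encode_kmer
  rw [PySem.Str.len_eq, PySem.Str.toList_slice]

-- ===== VERDICT (by name: the statement is the Claim_ definition above) =====
theorem extract_kmers_encoded_spec : Claim_equal_extract_kmers_encoded := by
  unfold Claim_equal_extract_kmers_encoded
  intro s _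
  unfold Spec_extract_kmers_encoded
  have hA : extract_kmers_encoded s = asetL s.toList := by
    unfold extract_kmers_encoded
    rw [asetL_eq_foldl, PySem.Str.len_eq]
    apply PySem.List.foldl_congr_mem
    intro acc i _
    show (match encode_kmer (PySem.Str.slice s (some i) (some (i + 15))) with
          | some encoded => PySem.Set.add acc encoded
          | none => acc) = bodyA s.toList acc i
    rw [encode_kmer_slice]
    rfl
  have hB : extract_kmers_encoded_alt s = (s.toList.foldl stepB (0, 0, [])).2.2 := rfl
  rw [hA, hB, foldB_inv]
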